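-- pv_equiv track=rewrite | github.com/thomas-hu-bc/JuniorCCC | 2013/P5J.py | check_winning
-- ===== SOURCE A (Python) =====
-- rep_order = [[0, 1], [0, 2], [0, 3], [1, 2], [1, 3], [2, 3]]
--
-- def check_winning(possible):
--     players=[0,0,0,0]
--     for index, result in enumerate(possible):
--         if result=='W':
--             player1, player2 = rep_order[index]
--             players[player1]+=3
--         elif result == 'L':
--             player1, player2 = rep_order[index]
--             players[player2]+=3
--         else:
--             player1, player2 = rep_order[index]
--             players[player1]+=1
--             players[player2]+=1
--     return players.index(max(players))
-- ===== SOURCE B (Python) =====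
-- rep_order = [[0, 1], [0, 2], [0, 3], [1, 2], [1, 3], [2, 3]]
--
-- def _credit(p, pair, result):
--     a, b = pair
--     if p != a and p != b:
--         return 0
--     if result == 'W':
--         return 3 if p == a else 0
--     if result == 'L':
--         return 3 if p == b else 0
--     return 1
--
-- def check_winning(possible):
--     scores = [sum(_credit(p, rep_order[i], r) for i, r in enumerate(possible))
--               for p in range(4)]
--     return max(range(4), key=scores.__getitem__)
-- ===== Notes on version B (the rewrite author's own statement) =====
-- stated objective: alternative
-- what changed: Replaced the single match-pass that mutates a 4-slot score array with a per-player nested scan: each player's score is summed independently over the matches via a credit function, and the winner is taken with max(range(4), key=...) instead of players.index(max(players)).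
import Mathlib
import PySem

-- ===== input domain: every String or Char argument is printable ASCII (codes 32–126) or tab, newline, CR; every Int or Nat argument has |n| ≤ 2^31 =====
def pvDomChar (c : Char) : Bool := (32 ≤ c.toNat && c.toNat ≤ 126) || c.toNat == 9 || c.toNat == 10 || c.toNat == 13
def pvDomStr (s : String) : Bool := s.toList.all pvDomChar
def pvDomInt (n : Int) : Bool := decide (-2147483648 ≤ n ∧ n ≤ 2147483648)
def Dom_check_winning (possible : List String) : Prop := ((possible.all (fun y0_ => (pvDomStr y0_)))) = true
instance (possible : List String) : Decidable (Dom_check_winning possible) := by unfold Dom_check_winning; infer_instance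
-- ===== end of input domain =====

-- B is the same tournament scoring done by a per-player nested scan instead of one mutating array pass; equivalence is on the return value (alternative decomposition, no speed claim).

-- ===== PORT A =====
-- module constant rep_order (pairs; list-of-two → pair under the convention)
def repOrder : List (Nat × Nat) := [(0,1), (0,2), (0,3), (1,2), (1,3), (2,3)]

-- players[k] += v on the 4-tuple state (k out of 0..3 cannot occur inside Pre_)
def pvBump (st : Int × Int × Int × Int) (k : Nat) (v : Int) : Int × Int × Int × Int :=
  match k with
  | 0 => (st.1 + v, st.2.1, st.2.2.1, st.2.2.2)
  | 1 => (st.1, st.2.1 + v, st.2.2.1, st.2.2.2)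
  | 2 => (st.1, st.2.1, st.2.2.1 + v, st.2.2.2)
  | 3 => (st.1, st.2.1, st.2.2.1, st.2.2.2 + v)
  | _ => st

-- one iteration of A's for-loop (rep_order[index]; index ≥ 6 only outside Pre_, default pair)
def pvStepA (st : Int × Int × Int × Int) (ir : Int × String) : Int × Int × Int × Int :=
  let pr := PySem.List.pyGetD repOrder ir.1 (0, 1)
  if ir.2 = "W" then pvBump st pr.1 3
  else if ir.2 = "L" then pvBump st pr.2 3
  else pvBump (pvBump st pr.1 1) pr.2 1

def check_winning (possible : List String) : Int :=
  let players := (PySem.List.enumerate possible).foldl pvStepA (0, 0, 0, 0)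
  -- max(players): Python's max scans keeping the current unless a strictly greater appears
  let m := [players.2.1, players.2.2.1, players.2.2.2].foldl (fun c x => if x > c then x else c) players.1
  -- players.index(m): first position equal to m (m is an element, so no ValueError)
  if players.1 = m then 0 else if players.2.1 = m then 1 else if players.2.2.1 = m then 2 else 3

-- ===== PORT B =====
-- B's _credit(p, pair, result)
def pvCredit (p : Nat) (pr : Nat × Nat) (result : String) : Int :=
  if p ≠ pr.1 ∧ p ≠ pr.2 then 0
  else if result = "W" then (if p = pr.1 then 3 else 0)
  else if result = "L" then (if p = pr.2 then 3 else 0)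
  else 1

-- B's sum over enumerate(possible) for one player
def pvScore (possible : List String) (p : Nat) : Int :=
  (PySem.List.enumerate possible).foldl
    (fun s ir => s + pvCredit p (PySem.List.pyGetD repOrder ir.1 (0, 1)) ir.2) 0

def check_winning_alt (possible : List String) : Int :=
  let scores := [pvScore possible 0, pvScore possible 1, pvScore possible 2, pvScore possible 3]
  -- max(range(4), key=scores.__getitem__): keep the earlier index unless strictly greater
  (([1, 2, 3].foldl
    (fun best p => if scores.getD p 0 > scores.getD best 0 then p else best) (0 : Nat) : Nat) : Int)

-- ===== PRECONDITION & SPEC =====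
-- Pre_ excludes exactly the inputs with more than 6 results, where both Pythons raise IndexError at rep_order[index].
def Pre_check_winning (possible : List String) : Prop := possible.length ≤ 6
instance (possible : List String) : Decidable (Pre_check_winning possible) := by unfold Pre_check_winning; infer_instance
def pvWitness_check_winning : List String := ["W", "L", "T", "W"]

def Spec_check_winning (possible : List String) (out : Int) : Prop := out = check_winning_alt possible
instance (possible : List String) (out : Int) : Decidable (Spec_check_winning possible out) := by unfold Spec_check_winning; infer_instance

-- ===== CLAIM (what is proved, stated in full; the proofs are below) =====
def Claim_equal_check_winning : Prop := ∀ (possible : List String), Dom_check_winning possible → Pre_check_winning possible → Spec_check_winning possible (check_winning possible)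

-- ===== LEMMAS AND PROOFS =====

-- B's per-player step just adds a credit, so the start value factors out.
theorem pvScore_shift (L : List (Int × String)) (p : Nat) (s : Int) :
    L.foldl (fun s ir => s + pvCredit p (PySem.List.pyGetD repOrder ir.1 (0, 1)) ir.2) s
      = s + L.foldl (fun s ir => s + pvCredit p (PySem.List.pyGetD repOrder ir.1 (0, 1)) ir.2) 0 := by
  induction L generalizing s with
  | nil => simp
  | cons hd tl ih =>
    simp only [List.foldl_cons, zero_add]
    rw [ih, ih (pvCredit p (PySem.List.pyGetD repOrder hd.1 (0, 1)) hd.2)]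
    ring

-- players[k] += v, written componentwise.
theorem pvBump_comp (st : Int × Int × Int × Int) (k : Nat) (v : Int) :
    pvBump st k v = (st.1 + (if k = 0 then v else 0), st.2.1 + (if k = 1 then v else 0),
                     st.2.2.1 + (if k = 2 then v else 0), st.2.2.2 + (if k = 3 then v else 0)) := by
  rcases k with _ | _ | _ | _ | k <;> simp [pvBump]

-- Any pair A's loop destructures has two distinct players (repOrder entries; (0,1) is the out-of-range default).
theorem pvPair_ne (i : Int) : (PySem.List.pyGetD repOrder i (0, 1)).1 ≠ (PySem.List.pyGetD repOrder i (0, 1)).2 := by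
  rcases h : PySem.List.pyGet? repOrder i with _ | pr
  · rw [PySem.List.pyGetD_of_none repOrder i (0, 1) h]
    decide
  · have hm := PySem.List.mem_of_pyGet?_eq_some repOrder h
    have he : PySem.List.pyGetD repOrder i (0, 1) = pr := by
      simp [PySem.List.pyGetD, h]
    rw [he]
    simp only [repOrder, List.mem_cons, List.not_mem_nil, or_false] at hm
    rcases hm with h' | h' | h' | h' | h' | h' <;> subst h' <;> decide

-- One A-step changes each component by exactly that player's credit.
set_option maxHeartbeats 1000000 in
theorem pvStepA_credit (st : Int × Int × Int × Int) (ir : Int × String) :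
    pvStepA st ir =
      (st.1 + pvCredit 0 (PySem.List.pyGetD repOrder ir.1 (0, 1)) ir.2,
       st.2.1 + pvCredit 1 (PySem.List.pyGetD repOrder ir.1 (0, 1)) ir.2,
       st.2.2.1 + pvCredit 2 (PySem.List.pyGetD repOrder ir.1 (0, 1)) ir.2,
       st.2.2.2 + pvCredit 3 (PySem.List.pyGetD repOrder ir.1 (0, 1)) ir.2) := by
  have hne := pvPair_ne ir.1
  unfold pvStepA
  generalize h : PySem.List.pyGetD repOrder ir.1 (0, 1) = pr
  rw [h] at hne
  obtain ⟨x, y⟩ := pr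
  simp only [ne_eq] at hne
  simp only [pvCredit]
  split_ifs with hW hL <;>
    rw [pvBump_comp] <;> try rw [pvBump_comp]
  all_goals simp only [Prod.mk.injEq]
  all_goals refine ⟨?_, ?_, ?_, ?_⟩ <;> split_ifs <;> omega

-- A's fold over the matches computes B's four per-player scores.
theorem pvFold_eq_scores (L : List (Int × String)) (a b c d : Int) :
    L.foldl pvStepA (a, b, c, d) =
      (a + L.foldl (fun s ir => s + pvCredit 0 (PySem.List.pyGetD repOrder ir.1 (0, 1)) ir.2) 0,
       b + L.foldl (fun s ir => s + pvCredit 1 (PySem.List.pyGetD repOrder ir.1 (0, 1)) ir.2) 0,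
       c + L.foldl (fun s ir => s + pvCredit 2 (PySem.List.pyGetD repOrder ir.1 (0, 1)) ir.2) 0,
       d + L.foldl (fun s ir => s + pvCredit 3 (PySem.List.pyGetD repOrder ir.1 (0, 1)) ir.2) 0) := by
  induction L generalizing a b c d with
  | nil => simp
  | cons hd tl ih =>
    simp only [List.foldl_cons]
    rw [pvStepA_credit, ih]
    rw [pvScore_shift tl 0 (0 + pvCredit 0 (PySem.List.pyGetD repOrder hd.1 (0, 1)) hd.2),
        pvScore_shift tl 1 (0 + pvCredit 1 (PySem.List.pyGetD repOrder hd.1 (0, 1)) hd.2),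
        pvScore_shift tl 2 (0 + pvCredit 2 (PySem.List.pyGetD repOrder hd.1 (0, 1)) hd.2),
        pvScore_shift tl 3 (0 + pvCredit 3 (PySem.List.pyGetD repOrder hd.1 (0, 1)) hd.2)]
    simp only [Prod.mk.injEq]
    refine ⟨by ring, by ring, by ring, by ring⟩

-- index(max(..)) and max(range, key=..) pick the same (first) winner.
set_option maxHeartbeats 2000000 in
theorem pvArgmax_eq (s0 s1 s2 s3 : Int) :
    (let m := [s1, s2, s3].foldl (fun c x => if x > c then x else c) s0
     if s0 = m then (0 : Int) else if s1 = m then 1 else if s2 = m then 2 else 3)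
    = (([1, 2, 3].foldl
        (fun best p => if [s0, s1, s2, s3].getD p 0 > [s0, s1, s2, s3].getD best 0 then p else best) (0 : Nat) : Nat) : Int) := by
  simp only [List.foldl_cons, List.foldl_nil]
  split_ifs <;> simp_all <;> omega

-- ===== VERDICT (by name: the statement is the Claim_ definition above) =====
theorem check_winning_spec : Claim_equal_check_winning := by
  intro possible _ _
  unfold Spec_check_winning check_winning check_winning_alt
  rw [pvFold_eq_scores]
  simp only [pvScore, zero_add]
  exact pvArgmax_eq _ _ _ _
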